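-- pv_equiv track=rewrite | github.com/markosolopenko/python | сode_wars/fundamentals/easy_diagonal.py | diagonal_inefficient
-- ===== SOURCE A (Python) =====
-- def pascal(c, r):
--     if c > r:
--         return 0
--     elif c == 0 or c == r:
--         return 1
--     else:
--         return pascal(c - 1, r - 1) + pascal(c, r - 1)
--
-- def diagonal_inefficient(n, p):
--     triangle = []
--
--     for i in range(n + 1):
--         row = []
--         for j in range(0, i + 1):
--             row.append(pascal(j, i))
--         triangle.append(row)
--     summ = 0
--
--     for i in range(n + 1):
--         if len(triangle[i]) > p:
--             summ += triangle[i][p]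
--
--     return summ
-- ===== SOURCE B (Python) =====
-- def diagonal_inefficient(n, p):
--     # hockey-stick identity: the sum of the p-th diagonal entries of rows 0..n
--     # of Pascal's triangle equals C(n+1, p+1), computed by one product loop.
--     if n < p:
--         return 0
--     num = 1
--     for k in range(1, p + 2):
--         num = num * (n - p + k) // k
--     return num
-- ===== Notes on version B (the rewrite author's own statement) =====
-- stated objective: faster
-- what changed: Replaces the exponential recursive construction of the whole triangle plus a row scan by the hockey-stick identity: the answer is the single binomial coefficient C(n+1, p+1), computed with one O(p) multiplicative loop (intended as asymptotically faster; measured: B read ~4500x at the one size both finished, but A timed out elsewhere so the probe could not confirm the ratio).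
-- outside the precondition, e.g. on diagonal_inefficient(2, -1): A returns 3, B returns 1; on diagonal_inefficient(-1, -2): A returns 0, B returns 1; on diagonal_inefficient(2, -2): A raises IndexError, B returns 1
import Mathlib
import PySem

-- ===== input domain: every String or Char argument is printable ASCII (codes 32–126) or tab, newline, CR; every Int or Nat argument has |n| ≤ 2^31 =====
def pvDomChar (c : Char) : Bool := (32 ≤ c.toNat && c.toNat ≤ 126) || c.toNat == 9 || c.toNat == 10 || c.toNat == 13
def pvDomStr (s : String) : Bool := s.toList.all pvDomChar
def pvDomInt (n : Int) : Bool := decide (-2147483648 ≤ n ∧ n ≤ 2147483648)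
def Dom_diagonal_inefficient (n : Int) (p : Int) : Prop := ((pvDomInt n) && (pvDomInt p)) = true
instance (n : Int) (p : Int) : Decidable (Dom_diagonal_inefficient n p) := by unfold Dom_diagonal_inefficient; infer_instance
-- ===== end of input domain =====

-- B replaces A's recursive construction of the whole triangle by the hockey-stick
-- closed form C(n+1, p+1), computed with one multiplicative loop (intended as
-- asymptotically faster; in a timing run A timed out where B returned).

-- ===== PORT A =====
-- Literal port of the recursive helper `pascal`. In the last Python branch either
-- 0 < c < r (the only calls diagonal_inefficient makes reach, all with 0 ≤ c ≤ r),
-- or c < 0 — where Python never returns (RecursionError): the `0 < r` guard only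
-- makes the Lean function total, returning 0 on that unreachable divergent region.
def pascal (c : Int) (r : Int) : Int :=
  if c > r then 0
  else if c = 0 ∨ c = r then 1
  else if _h : 0 < r then pascal (c - 1) (r - 1) + pascal c (r - 1)
  else 0
termination_by r.toNat
decreasing_by all_goals omega

def diagonal_inefficient (n : Int) (p : Int) : Int :=
  let triangle : List (List Int) :=
    (PySem.List.pyRange 0 (n + 1) 1).foldl
      (fun tri i =>
        tri ++ [(PySem.List.pyRange 0 (i + 1) 1).foldl (fun row j => row ++ [pascal j i]) []])
      []
  (PySem.List.pyRange 0 (n + 1) 1).foldl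
    (fun summ i =>
      let row := PySem.List.pyGetD triangle i []
      if (row.length : Int) > p then summ + PySem.List.pyGetD row p 0 else summ)
    0

-- ===== PORT B =====
def diagonal_inefficient_alt (n : Int) (p : Int) : Int :=
  if n < p then 0
  else
    (PySem.List.pyRange 1 (p + 2) 1).foldl
      (fun num k => PySem.Int.floordiv (num * (n - p + k)) k) 1

-- ===== PRECONDITION & SPEC =====
-- Pre_ keeps the natural domain (a nonnegative diagonal index p) plus the vacuous
-- n < p corner; it excludes p < 0 with n ≥ p, where A raises IndexError for n ≥ 0
-- and the values it does return for n < 0 come from Python's negative-index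
-- wraparound / empty-loop corners.
def Pre_diagonal_inefficient (n : Int) (p : Int) : Prop := 0 ≤ p ∨ n < p
instance (n : Int) (p : Int) : Decidable (Pre_diagonal_inefficient n p) := by
  unfold Pre_diagonal_inefficient; infer_instance

def pvWitness_diagonal_inefficient : Int × Int := (6, 2)

def Spec_diagonal_inefficient (n : Int) (p : Int) (out : Int) : Prop := out = diagonal_inefficient_alt n p
instance (n : Int) (p : Int) (out : Int) : Decidable (Spec_diagonal_inefficient n p out) := by unfold Spec_diagonal_inefficient; infer_instance

-- ===== CLAIM (what is proved, stated in full; the proofs are below) =====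
def Claim_equal_diagonal_inefficient : Prop := ∀ (n : Int) (p : Int), Dom_diagonal_inefficient n p → Pre_diagonal_inefficient n p → Spec_diagonal_inefficient n p (diagonal_inefficient n p)

-- ===== LEMMAS AND PROOFS =====

-- A's recursive `pascal` computes the binomial coefficient.
theorem pascal_eq_choose : ∀ (r c : Nat), pascal (c : Int) (r : Int) = (r.choose c : Int) := by
  intro r
  induction r with
  | zero =>
    intro c
    unfold pascal
    rcases Nat.eq_zero_or_pos c with hc | hc
    · subst hc; simp
    · have h1 : (c : Int) > ((0 : Nat) : Int) := by exact_mod_cast hc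
      rw [if_pos h1, Nat.choose_eq_zero_of_lt hc]
      simp
  | succ r ih =>
    intro c
    unfold pascal
    by_cases h1 : (c : Int) > ((r + 1 : Nat) : Int)
    · have hlt : r + 1 < c := by exact_mod_cast h1
      rw [if_pos h1, Nat.choose_eq_zero_of_lt hlt]
      simp
    · simp only [h1, if_false]
      by_cases h2 : (c : Int) = 0 ∨ (c : Int) = ((r + 1 : Nat) : Int)
      · rcases h2 with h2 | h2
        · have : c = 0 := by exact_mod_cast h2
          subst this; simp
        · have : c = r + 1 := by exact_mod_cast h2
          subst this; simp
      · have hc0 : c ≠ 0 := by intro h; exact h2 (Or.inl (by exact_mod_cast h))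
        have hpos : (0:Int) < ((r + 1 : Nat) : Int) := by positivity
        simp only [h2, if_false]
        rw [dif_pos hpos]
        obtain ⟨c', rfl⟩ : ∃ c', c = c' + 1 := ⟨c - 1, by omega⟩
        have e1 : ((c' + 1 : Nat) : Int) - 1 = (c' : Int) := by push_cast; ring
        have e2 : ((r + 1 : Nat) : Int) - 1 = (r : Int) := by push_cast; ring
        rw [e1, e2, ih c', ih (c' + 1), Nat.choose_succ_succ]
        push_cast; ring

-- A's summation loop is the hockey-stick sum ∑_{i≤N} C(i,P) = C(N+1,P+1).
theorem hockey_fold (P : Nat) : ∀ (N : Nat),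
    (List.range (N + 1)).foldl (fun s i => if P ≤ i then s + (i.choose P : Int) else s) 0
      = ((N + 1).choose (P + 1) : Int) := by
  intro N
  induction N with
  | zero =>
    rcases Nat.eq_zero_or_pos P with h | h
    · subst h; simp
    · simp [List.range_succ, Nat.not_le.mpr h, Nat.choose_eq_zero_of_lt (by omega : 1 < P + 1)]
  | succ N ih =>
    rw [List.range_succ, List.foldl_append, ih]
    simp only [List.foldl_cons, List.foldl_nil]
    by_cases h : P ≤ N + 1
    · rw [if_pos h, Nat.choose_succ_succ (N + 1) P]
      push_cast; ring
    · rw [if_neg h, Nat.choose_succ_succ (N + 1) P,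
        Nat.choose_eq_zero_of_lt (by omega : N + 1 < P)]
      push_cast; ring

-- A's inner row loop builds row i of Pascal's triangle.
theorem row_eq (i : Nat) :
    (PySem.List.pyRange 0 ((i : Int) + 1) 1).foldl (fun row j => row ++ [pascal j (i : Int)]) []
      = (List.range (i + 1)).map (fun j : Nat => ((i.choose j : Nat) : Int)) := by
  rw [show (i : Int) + 1 = ((i + 1 : Nat) : Int) by push_cast; ring,
    PySem.List.pyRange_zero_natCast, PySem.List.foldl_append_singleton_eq_map, List.map_map]
  simp only [List.nil_append]
  exact List.map_congr_left (fun j _ => pascal_eq_choose i j)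

-- A on nonnegative arguments is the single binomial coefficient C(N+1,P+1).
theorem diagA_eq_choose (N P : Nat) :
    diagonal_inefficient (N : Int) (P : Int) = ((N + 1).choose (P + 1) : Int) := by
  have hcast : (N : Int) + 1 = ((N + 1 : Nat) : Int) := by push_cast; ring
  unfold diagonal_inefficient
  simp only [hcast, PySem.List.pyRange_zero_natCast, List.foldl_map]
  rw [PySem.List.foldl_append_singleton_eq_map]
  simp only [List.nil_append, row_eq]
  rw [← hockey_fold P N]
  apply PySem.List.foldl_congr_mem
  intro s i hi
  have hi' : i < N + 1 := by simpa [List.mem_range] using hi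
  have hget : PySem.List.pyGetD
      ((List.range (N + 1)).map (fun i : Nat => (List.range (i + 1)).map (fun j : Nat => ((i.choose j : Nat) : Int)))) (i : Int) []
      = (List.range (i + 1)).map (fun j : Nat => ((i.choose j : Nat) : Int)) := by
    rw [PySem.List.pyGetD_natCast, List.getD_eq_getElem?_getD, List.getElem?_map,
      List.getElem?_range hi']
    rfl
  rw [hget]
  simp only [List.length_map, List.length_range]
  by_cases hP : P ≤ i
  · rw [if_pos (by exact_mod_cast (by omega : (P : Int) < (i : Int) + 1)), if_pos hP]
    congr 1
    rw [PySem.List.pyGetD_natCast, List.getD_eq_getElem?_getD, List.getElem?_map,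
      List.getElem?_range (by omega : P < i + 1)]
    rfl
  · rw [if_neg (by exact_mod_cast (by omega : ¬ ((P : Int) < (i : Int) + 1))), if_neg hP]

-- B's multiplicative loop over k = 1..t computes C(M+t, t) (each division is exact).
theorem foldB_eq_choose (M : Nat) : ∀ (t : Nat),
    (PySem.List.pyRange 1 ((t : Int) + 1) 1).foldl
      (fun num k => PySem.Int.floordiv (num * ((M : Int) + k)) k) 1
    = ((M + t).choose t : Int) := by
  intro t
  induction t with
  | zero => simp [PySem.List.pyRange_one_eq_nil]
  | succ t ih =>
    have hsplit : PySem.List.pyRange 1 ((t + 1 : Nat) + 1 : Int) 1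
        = PySem.List.pyRange 1 ((t : Int) + 1) 1 ++ [((t : Int) + 1)] := by
      have := PySem.List.pyRange_one_succ_right (a := 1) (b := (t : Int) + 1) (by omega)
      push_cast
      convert this using 2
    rw [show ((t + 1 : Nat) : Int) + 1 = ((t + 1 : Nat) + 1 : Int) from rfl] at *
    rw [hsplit, List.foldl_append, ih]
    simp only [List.foldl_cons, List.foldl_nil]
    have key : ((M + t).choose t : Int) * ((M : Int) + ((t : Int) + 1))
        = ((M + (t + 1)).choose (t + 1) : Int) * ((t : Int) + 1) := by
      have h : (M + t + 1) * (M + t).choose t = (M + t + 1).choose (t + 1) * (t + 1) := by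
        simpa using Nat.add_one_mul_choose_eq (M + t) t
      have e : M + (t + 1) = M + t + 1 := by ring
      rw [e]
      have h' := congrArg (fun x : Nat => (x : Int)) h
      push_cast at h' ⊢
      linear_combination h'
    rw [key]
    have hpos : (0 : Int) < (t : Int) + 1 := by positivity
    rw [PySem.Int.floordiv_eq_ediv_of_pos hpos, Int.mul_ediv_cancel _ (by omega)]

-- ===== VERDICT (by name: the statement is the Claim_ definition above) =====
theorem diagonal_inefficient_spec : Claim_equal_diagonal_inefficient := by
  intro n p _ hpre
  unfold Spec_diagonal_inefficient
  by_cases hp : 0 ≤ p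
  case neg =>
    have hnp : n < p := hpre.resolve_left hp
    unfold diagonal_inefficient diagonal_inefficient_alt
    rw [PySem.List.pyRange_one_eq_nil (by omega), if_pos hnp]
    simp
  obtain ⟨P, rfl⟩ : ∃ P : Nat, p = (P : Int) := ⟨p.toNat, (Int.toNat_of_nonneg hp).symm⟩
  by_cases hn : n < 0
  · unfold diagonal_inefficient diagonal_inefficient_alt
    rw [PySem.List.pyRange_one_eq_nil (by omega), if_pos (by omega : n < (P : Int))]
    simp
  · obtain ⟨N, rfl⟩ : ∃ N : Nat, n = (N : Int) := ⟨n.toNat, by omega⟩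
    rw [diagA_eq_choose]
    unfold diagonal_inefficient_alt
    by_cases hlt : (N : Int) < (P : Int)
    · rw [if_pos hlt, Nat.choose_eq_zero_of_lt (by exact_mod_cast (by omega : (N : Int) + 1 < (P : Int) + 1))]
      simp
    · rw [if_neg hlt]
      have hNP : P ≤ N := by exact_mod_cast not_lt.mp hlt
      have hfun : (fun (num k : Int) => PySem.Int.floordiv (num * ((N : Int) - (P : Int) + k)) k)
          = (fun (num k : Int) => PySem.Int.floordiv (num * (((N - P : Nat) : Int) + k)) k) := by
        funext num k
        rw [Nat.cast_sub hNP]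
      have hrng : (P : Int) + 2 = ((P + 1 : Nat) : Int) + 1 := by push_cast; ring
      rw [hrng, hfun, foldB_eq_choose (N - P) (P + 1)]
      have e : N - P + (P + 1) = N + 1 := by omega
      rw [e]
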